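-- pv_equiv track=rewrite | github.com/kalchenkoivanzalypa-jpg/KalkulatorTopliva1 | railway/book1_parser_graph.py | resolve_city_to_station_code
-- ===== SOURCE A (Python) =====
-- from typing import DefaultDict, Dict, List, Optional, Tuple
--
-- def clean_cell(cell: str) -> str:
--     if cell is None:
--         return ""
--     return str(cell).replace("\ufeff", "").strip().strip('"').strip()
--
-- def normalize_name(s: str) -> str:
--     return clean_cell(s).lower().replace("ё", "е")
--
-- def resolve_city_to_station_code(
--     city_query: str,
--     code_to_name: Dict[str, str],
--     pick_first: bool = True,
-- ) -> str:
--     """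
--     Выбираем любую станцию/пункт, у которого имя содержит запрос по городу.
--     """
--     q = normalize_name(city_query)
--     candidates: List[Tuple[str, str]] = []
--     for code, name in code_to_name.items():
--         n = normalize_name(name)
--         if q in n:
--             candidates.append((code, name))
--
--     if not candidates:
--         raise ValueError(f"Не нашёл станции для запроса города: {city_query!r}")
--
--     # Приоритет: точное вхождение всего слова/строки если возможно (упрощённо).
--     # Если кандидат один — берем его.
--     if pick_first:
--         # сортировка для стабильности: сначала короче имя
--         candidates.sort(key=lambda x: (len(normalize_name(x[1])), x[1]))
--         return candidates[0][0]
--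
--     # fallback
--     return candidates[0][0]
-- ===== SOURCE B (Python) =====
-- # B: one-pass running-best scan (no candidates list, no sort); strict '<' on the
-- # same (len(normalized name), name) key reproduces the stable-sort-then-[0] choice.
-- from typing import Dict
--
--
-- def clean_cell(cell: str) -> str:
--     if cell is None:
--         return ""
--     return str(cell).replace("\ufeff", "").strip().strip('"').strip()
--
--
-- def normalize_name(s: str) -> str:
--     return clean_cell(s).lower().replace("ё", "е")
--
--
-- def resolve_city_to_station_code(
--     city_query: str,
--     code_to_name: Dict[str, str],
--     pick_first: bool = True,
-- ) -> str:
--     q = normalize_name(city_query)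
--     best = None  # (code, name) of the best candidate so far
--     for code, name in code_to_name.items():
--         if q not in normalize_name(name):
--             continue
--         if not pick_first:
--             return code
--         if best is None or (
--             len(normalize_name(name)), name
--         ) < (len(normalize_name(best[1])), best[1]):
--             best = (code, name)
--     if best is None:
--         raise ValueError(f"Не нашёл станции для запроса города: {city_query!r}")
--     return best[0]
-- ===== Notes on version B (the rewrite author's own statement) =====
-- stated objective: alternative
-- what changed: Replaces A's build-candidates-list-then-stable-sort-then-take-[0] with a single pass over the dict that keeps a running best under strict lexicographic key comparison (and an early return for pick_first=False); the candidates list and the sort disappear.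
import Mathlib
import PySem

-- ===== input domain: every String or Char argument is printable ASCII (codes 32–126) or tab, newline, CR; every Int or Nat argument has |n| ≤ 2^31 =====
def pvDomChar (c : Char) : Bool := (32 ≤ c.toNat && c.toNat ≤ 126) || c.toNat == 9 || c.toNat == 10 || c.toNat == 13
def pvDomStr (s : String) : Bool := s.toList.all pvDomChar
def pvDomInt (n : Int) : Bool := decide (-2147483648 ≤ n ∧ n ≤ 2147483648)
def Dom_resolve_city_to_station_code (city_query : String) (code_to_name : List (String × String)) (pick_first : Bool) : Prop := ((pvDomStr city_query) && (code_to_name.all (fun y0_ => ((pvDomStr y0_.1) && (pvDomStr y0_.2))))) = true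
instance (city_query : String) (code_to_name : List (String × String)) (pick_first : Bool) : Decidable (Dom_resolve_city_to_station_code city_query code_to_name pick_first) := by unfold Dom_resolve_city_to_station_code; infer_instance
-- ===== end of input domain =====

-- B changes the algorithm: one running-best pass instead of A's candidates list + stable sort + [0].

-- shared module helpers (clean_cell / normalize_name from the Python module, used by both programs)
def pvCleanCell (s : String) : String :=
  PySem.Str.strip (PySem.Str.stripChars (PySem.Str.strip (PySem.Str.replace s "\ufeff" "")) "\"")

def pvNormalizeName (s : String) : String :=
  PySem.Str.replace (PySem.Str.lower (pvCleanCell s)) "ё" "е"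

-- ===== PORT A =====
def resolve_city_to_station_code (city_query : String) (code_to_name : List (String × String)) (pick_first : Bool) : String :=
  let q := pvNormalizeName city_query
  let candidates :=
    ((PySem.Dict.ofList code_to_name).items).foldl
      (fun acc p => if PySem.Str.isIn q (pvNormalizeName p.2) then acc ++ [p] else acc) []
  -- 'if not candidates: raise ValueError(...)' is excluded by Pre_; "" stands for the raise
  if pick_first then
    (((PySem.List.sorted2 candidates
        (fun x => PySem.Str.len (pvNormalizeName x.2)) (fun x => x.2)).head?).map Prod.fst).getD ""
  else
    ((candidates.head?).map Prod.fst).getD ""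

-- ===== PORT B =====
-- key comparison: Python's tuple '<' on (len(normalize_name(name)), name)
def pvKeyLt (p b : String × String) : Bool :=
  decide (PySem.Str.len (pvNormalizeName p.2) < PySem.Str.len (pvNormalizeName b.2))
    || (decide (PySem.Str.len (pvNormalizeName p.2) = PySem.Str.len (pvNormalizeName b.2))
        && decide (p.2 < b.2))

-- 'best is None or key < best-key' update of the running best
def pvBestStep (best : Option (String × String)) (p : String × String) : Option (String × String) :=
  match best with
  | none => some p
  | some b => if pvKeyLt p b then some p else best

def resolve_city_to_station_code_alt (city_query : String) (code_to_name : List (String × String)) (pick_first : Bool) : String :=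
  let q := pvNormalizeName city_query
  let items := (PySem.Dict.ofList code_to_name).items
  if pick_first then
    -- running best under Python's tuple '<' on (len(normalize_name(name)), name)
    match items.foldl
        (fun best p =>
          if PySem.Str.isIn q (pvNormalizeName p.2) then pvBestStep best p
          else best) none with
    | some b => b.1
    | none => ""   -- the raise, excluded by Pre_
  else
    -- early 'return code' on the first match
    match items.find? (fun p => PySem.Str.isIn q (pvNormalizeName p.2)) with
    | some p => p.1
    | none => ""   -- the raise, excluded by Pre_

-- ===== PRECONDITION & SPEC =====
-- Pre_ excludes exactly the inputs on which Python A raises ValueError: no name in the dict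
-- (insertion-order items, duplicate keys keeping the last value) contains the normalized query.
def Pre_resolve_city_to_station_code (city_query : String) (code_to_name : List (String × String)) (pick_first : Bool) : Prop :=
  ∃ p ∈ (PySem.Dict.ofList code_to_name).items,
    PySem.Str.isIn (pvNormalizeName city_query) (pvNormalizeName p.2) = true
instance (city_query : String) (code_to_name : List (String × String)) (pick_first : Bool) : Decidable (Pre_resolve_city_to_station_code city_query code_to_name pick_first) := by unfold Pre_resolve_city_to_station_code; infer_instance

def pvWitness_resolve_city_to_station_code : String × (List (String × String)) × Bool :=
  ("Moscow", [("ABC", "Moscow city"), ("Z", " MOSCOW ")], true)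

def Spec_resolve_city_to_station_code (city_query : String) (code_to_name : List (String × String)) (pick_first : Bool) (out : String) : Prop := out = resolve_city_to_station_code_alt city_query code_to_name pick_first
instance (city_query : String) (code_to_name : List (String × String)) (pick_first : Bool) (out : String) : Decidable (Spec_resolve_city_to_station_code city_query code_to_name pick_first out) := by unfold Spec_resolve_city_to_station_code; infer_instance

-- ===== CLAIM (what is proved, stated in full; the proofs are below) =====
def Claim_equal_resolve_city_to_station_code : Prop := ∀ (city_query : String) (code_to_name : List (String × String)) (pick_first : Bool), Dom_resolve_city_to_station_code city_query code_to_name pick_first → Pre_resolve_city_to_station_code city_query code_to_name pick_first → Spec_resolve_city_to_station_code city_query code_to_name pick_first (resolve_city_to_station_code city_query code_to_name pick_first)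

-- ===== LEMMAS AND PROOFS =====

-- the Option-level running-best step induced by a comparison
def pvStep {α : Type} (before : α → α → Bool) (m : Option α) (x : α) : Option α :=
  match m with
  | none => some x
  | some h => if before x h then some x else some h

-- head of an insertBy step is a running-best step
theorem pv_head?_insertBy {α : Type} (before : α → α → Bool) (x : α) (acc : List α) :
    (PySem.List.insertBy before x acc).head? = pvStep before acc.head? x := by
  cases acc with
  | nil => simp [PySem.List.insertBy, pvStep]
  | cons y ys =>
    by_cases hb : before x y = true <;>
      simp [PySem.List.insertBy, pvStep, hb]

-- head of an insertion sort = a running-best fold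
theorem pv_head?_foldl_insertBy {α : Type} (before : α → α → Bool) (xs : List α) :
    ∀ acc : List α,
      (xs.foldl (fun a x => PySem.List.insertBy before x a) acc).head?
        = xs.foldl (pvStep before) acc.head? := by
  induction xs with
  | nil => intro acc; rfl
  | cons x xs ih =>
    intro acc
    simp only [List.foldl_cons]
    rw [ih (PySem.List.insertBy before x acc), pv_head?_insertBy]

-- Python's lexicographic tuple '<' agrees with the sorted2 comparison on a linear order
theorem pv_lex_eq (l L : Int) (n N : String) :
    (decide (l < L) || (!decide (L < l) && decide (n < N)))
      = (decide (l < L) || (decide (l = L) && decide (n < N))) := by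
  by_cases h1 : l < L
  · simp [h1]
  · by_cases h2 : L < l
    · have hne : l ≠ L := by omega
      simp [h1, h2, hne]
    · have heq : l = L := by omega
      simp [heq]

theorem resolve_city_to_station_code_eq (city_query : String) (code_to_name : List (String × String)) (pick_first : Bool) :
    resolve_city_to_station_code city_query code_to_name pick_first
      = resolve_city_to_station_code_alt city_query code_to_name pick_first := by
  unfold resolve_city_to_station_code resolve_city_to_station_code_alt
  have hcand : ∀ (q : String) (items : List (String × String)),
      items.foldl (fun acc p => if PySem.Str.isIn q (pvNormalizeName p.2) then acc ++ [p] else acc) []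
        = items.filter (fun p => PySem.Str.isIn q (pvNormalizeName p.2)) := by
    intro q items
    rw [PySem.List.foldl_append_if (fun p => PySem.Str.isIn q (pvNormalizeName p.2)) (fun p => p) items []]
    simp
  cases pick_first with
  | false =>
    simp only [Bool.false_eq_true, if_false, hcand, List.head?_filter]
    cases h : ((PySem.Dict.ofList code_to_name).items).find?
        (fun p => PySem.Str.isIn (pvNormalizeName city_query) (pvNormalizeName p.2)) <;> simp
  | true =>
    simp only [if_true, hcand]
    -- left side: sorted2 is an insertion sort (definitional); its head is a running-best fold
    rw [show ∀ (c : List (String × String)),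
        PySem.List.sorted2 c (fun x => PySem.Str.len (pvNormalizeName x.2)) (fun x => x.2)
          = c.foldl (fun a x => PySem.List.insertBy
              (fun a b => decide (PySem.Str.len (pvNormalizeName a.2) < PySem.Str.len (pvNormalizeName b.2))
                  || (!decide (PySem.Str.len (pvNormalizeName b.2) < PySem.Str.len (pvNormalizeName a.2))
                      && decide (a.2 < b.2))) x a) [] from fun _ => rfl]
    rw [pv_head?_foldl_insertBy]
    -- right side: the guarded fold over items is the fold over the filtered candidates
    rw [show (none : Option (String × String)) = ([] : List (String × String)).head? from rfl]
    rw [← List.foldl_filter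
      (p := fun p => PySem.Str.isIn (pvNormalizeName city_query) (pvNormalizeName p.2))
      (f := pvBestStep)]
    -- the two running-best step functions are pointwise equal
    have hfun :
        pvStep (fun (a b : String × String) =>
            decide (PySem.Str.len (pvNormalizeName a.2) < PySem.Str.len (pvNormalizeName b.2))
              || (!decide (PySem.Str.len (pvNormalizeName b.2) < PySem.Str.len (pvNormalizeName a.2))
                  && decide (a.2 < b.2)))
          = pvBestStep := by
      funext m x
      cases m with
      | none => rfl
      | some h =>
        simp only [pvStep, pvBestStep, pvKeyLt, pv_lex_eq]
        split <;> rfl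
    rw [hfun]
    cases hres : (((PySem.Dict.ofList code_to_name).items).filter
        (fun p => PySem.Str.isIn (pvNormalizeName city_query) (pvNormalizeName p.2))).foldl
        pvBestStep [].head? <;> simp

-- ===== VERDICT (by name: the statement is the Claim_ definition above) =====
theorem resolve_city_to_station_code_spec : Claim_equal_resolve_city_to_station_code := by
  intro city_query code_to_name pick_first _ _
  exact resolve_city_to_station_code_eq city_query code_to_name pick_first
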